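-- pv_equiv track=rewrite | github.com/Mike-Wazowsk1/codeforces_pilot | Z function/step 1/prefix_and_suffix_substring.py | find_prefix_and_suffix
-- ===== SOURCE A (Python) =====
-- def find_prefix_and_suffix(s):
--     count = 0
--     for i in range(1,len(s)+1):
--         prefix = s[:i]
--         suffix = s[-i:]
--         if prefix != suffix:
--             for j in range(len(s)):
--                 if prefix == s[j:j+len(prefix)] or suffix == s[j:j+len(suffix)]:
--                     count+=1
--
--
--     return count
-- ===== SOURCE B (Python) =====
-- def _lcp(x, y):
--     k = 0
--     for a, b in zip(x, y):
--         if a != b: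
--             return k
--         k += 1
--     return k
--
--
-- def find_prefix_and_suffix(s):
--     n = len(s)
--     z = [_lcp(s, s[j:]) for j in range(n + 1)]
--     r = s[::-1]
--     zr = [_lcp(r, r[j:]) for j in range(n + 1)]
--     count = 0
--     for i in range(1, n + 1):
--         if z[n - i] >= i:
--             continue
--         for j in range(n - i + 1):
--             if z[j] >= i or zr[n - j - i] >= i:
--                 count += 1
--     return count
-- ===== Notes on version B (the rewrite author's own statement) =====
-- stated objective: faster
-- what changed: Precomputes longest-common-prefix tables z (of s against each of its suffixes) and zr (same for the reversed string) once, so every prefix/suffix occurrence test in the double loop becomes an O(1) table comparison instead of an O(i) slice comparison, and the inner loop stops at n-i where longer matches are impossible.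
import Mathlib
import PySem

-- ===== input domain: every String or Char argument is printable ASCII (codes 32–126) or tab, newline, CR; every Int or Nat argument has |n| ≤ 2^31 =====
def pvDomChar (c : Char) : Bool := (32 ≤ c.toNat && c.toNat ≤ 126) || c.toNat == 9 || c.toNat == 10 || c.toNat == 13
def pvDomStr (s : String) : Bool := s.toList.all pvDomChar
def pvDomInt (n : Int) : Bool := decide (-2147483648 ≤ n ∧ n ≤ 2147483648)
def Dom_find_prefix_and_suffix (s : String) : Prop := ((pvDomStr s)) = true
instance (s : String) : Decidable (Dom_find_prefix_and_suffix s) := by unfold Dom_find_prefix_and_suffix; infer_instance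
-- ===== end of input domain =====

-- B precomputes lcp tables z/zr so each occurrence test is O(1) instead of an O(i) slice compare; return value only, no mutation.

-- ===== PORT A =====
def find_prefix_and_suffix (s : String) : Int :=
  let l := s.toList
  (PySem.List.pyRange 1 (PySem.List.len l + 1) 1).foldl (fun count i =>
    let pfx := PySem.List.slice l none (some i)
    let sfx := PySem.List.slice l (some (-i)) none
    if pfx ≠ sfx then
      (PySem.List.pyRange 0 (PySem.List.len l) 1).foldl (fun count j =>
        if pfx = PySem.List.slice l (some j) (some (j + PySem.List.len pfx)) ∨
           sfx = PySem.List.slice l (some j) (some (j + PySem.List.len sfx)) then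
          count + 1
        else count) count
    else count) 0

-- ===== PORT B =====
-- _lcp(x, y): length of the longest common prefix of x and y (early-return zip loop)
def pvLcp : List Char → List Char → Int
  | a :: x, b :: y => if a = b then pvLcp x y + 1 else 0
  | _, _ => 0

def find_prefix_and_suffix_alt (s : String) : Int :=
  let l := s.toList
  let n : Int := PySem.List.len l
  let z := (PySem.List.pyRange 0 (n + 1) 1).map (fun j => pvLcp l (PySem.List.slice l (some j) none))
  let r := l.reverse
  let zr := (PySem.List.pyRange 0 (n + 1) 1).map (fun j => pvLcp r (PySem.List.slice r (some j) none))
  (PySem.List.pyRange 1 (n + 1) 1).foldl (fun count i =>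
    if i ≤ PySem.List.pyGetD z (n - i) 0 then count
    else
      (PySem.List.pyRange 0 (n - i + 1) 1).foldl (fun count j =>
        if i ≤ PySem.List.pyGetD z j 0 ∨ i ≤ PySem.List.pyGetD zr (n - j - i) 0 then
          count + 1
        else count) count) 0

-- ===== PRECONDITION & SPEC =====
def Spec_find_prefix_and_suffix (s : String) (out : Int) : Prop := out = find_prefix_and_suffix_alt s
instance (s : String) (out : Int) : Decidable (Spec_find_prefix_and_suffix s out) := by unfold Spec_find_prefix_and_suffix; infer_instance

-- ===== CLAIM (what is proved, stated in full; the proofs are below) =====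
def Claim_equal_find_prefix_and_suffix : Prop := ∀ (s : String), Dom_find_prefix_and_suffix s → Spec_find_prefix_and_suffix s (find_prefix_and_suffix s)

-- ===== LEMMAS AND PROOFS =====

theorem pvLcp_nonneg (x y : List Char) : 0 ≤ pvLcp x y := by
  induction x generalizing y with
  | nil => simp [pvLcp]
  | cons a x ih =>
    cases y with
    | nil => simp [pvLcp]
    | cons b y =>
      simp only [pvLcp]
      split
      · have := ih y; omega
      · omega

theorem pvLcp_ge_iff (x y : List Char) (k : Nat) (hx : k ≤ x.length) (hy : k ≤ y.length) :
    ((k : Int) ≤ pvLcp x y) ↔ x.take k = y.take k := by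
  induction k generalizing x y with
  | zero => simpa using pvLcp_nonneg x y
  | succ k ih =>
    cases x with
    | nil => simp at hx
    | cons a x =>
      cases y with
      | nil => simp at hy
      | cons b y =>
        simp only [List.length_cons] at hx hy
        simp only [pvLcp, List.take_succ_cons]
        by_cases hab : a = b
        · subst hab
          rw [if_pos rfl]
          constructor
          · intro h
            have : (k : Int) ≤ pvLcp x y := by push_cast at h ⊢; omega
            simp [(ih x y (by omega) (by omega)).1 this]
          · intro h
            have h2 : x.take k = y.take k := by simpa using h
            have := (ih x y (by omega) (by omega)).2 h2
            push_cast; omega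
        · rw [if_neg hab]
          constructor
          · intro h; exfalso; push_cast at h; omega
          · intro h; exact absurd (List.cons.injEq .. ▸ h).1 hab

theorem take_reverse_mid (l : List Char) (j k : Nat) (h : j + k ≤ l.length) :
    ((l.drop j).take k).reverse = (l.reverse.drop (l.length - j - k)).take k := by
  rw [List.reverse_take, List.reverse_drop, List.drop_take, List.length_drop]
  congr 1
  omega

theorem prefix_occ_iff (l : List Char) (j k : Nat) (hk1 : 1 ≤ k) (hk : k ≤ l.length) :
    l.take k = (l.drop j).take k ↔ (j + k ≤ l.length ∧ (k : Int) ≤ pvLcp l (l.drop j)) := by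
  constructor
  · intro h
    have hlen := congrArg List.length h
    simp only [List.length_take, List.length_drop] at hlen
    have hjk : j + k ≤ l.length := by omega
    exact ⟨hjk, (pvLcp_ge_iff l (l.drop j) k hk (by simp [List.length_drop]; omega)).2 h⟩
  · rintro ⟨h1, h2⟩
    exact (pvLcp_ge_iff l (l.drop j) k hk (by simp [List.length_drop]; omega)).1 h2

theorem suffix_occ_iff (l : List Char) (j k : Nat) (hk1 : 1 ≤ k) (hk : k ≤ l.length) :
    l.drop (l.length - k) = (l.drop j).take k ↔
      (j + k ≤ l.length ∧ (k : Int) ≤ pvLcp l.reverse (l.reverse.drop (l.length - j - k))) := by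
  have hrev : ∀ (h : j + k ≤ l.length),
      (l.drop (l.length - k) = (l.drop j).take k ↔
        (k : Int) ≤ pvLcp l.reverse (l.reverse.drop (l.length - j - k))) := by
    intro h
    rw [← List.reverse_inj, List.reverse_drop, take_reverse_mid l j k h]
    have hnk : l.length - (l.length - k) = k := by omega
    rw [hnk]
    exact (pvLcp_ge_iff l.reverse (l.reverse.drop (l.length - j - k)) k
      (by simpa using hk) (by simp [List.length_drop]; omega)).symm
  constructor
  · intro h
    have hlen := congrArg List.length h
    simp only [List.length_take, List.length_drop] at hlen
    have hjk : j + k ≤ l.length := by omega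
    exact ⟨hjk, (hrev hjk).1 h⟩
  · rintro ⟨h1, h2⟩
    exact (hrev h1).2 h2

-- index into the z table: z[m] is the lcp of l with l[m:]
theorem zTab_get (l : List Char) (m : Nat) (hm : m ≤ l.length) :
    PySem.List.pyGetD
      ((PySem.List.pyRange 0 ((l.length : Int) + 1) 1).map
        (fun j => pvLcp l (PySem.List.slice l (some j) none))) (m : Int) 0
    = pvLcp l (l.drop m) := by
  have hcast : ((l.length : Int) + 1) = ((l.length + 1 : Nat) : Int) := by push_cast; ring
  rw [hcast, PySem.List.pyGetD_map_pyRange _ (l.length + 1) m 0 (by omega),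
    PySem.List.slice_from_natCast]

-- the guard: prefix == suffix  ↔  z[n-i] >= i
theorem guard_iff (l : List Char) (k : Nat) (hk1 : 1 ≤ k) (hkn : k ≤ l.length) :
    (List.take k l = List.drop (l.length - k) l) ↔
      ((k : Int) ≤ pvLcp l (l.drop (l.length - k))) := by
  have hlen : (List.drop (l.length - k) l).length = k := by simp; omega
  have htk : (List.drop (l.length - k) l).take k = List.drop (l.length - k) l :=
    List.take_of_length_le (by omega)
  have h2 := prefix_occ_iff l (l.length - k) k hk1 hkn
  rw [htk] at h2
  rw [h2]
  constructor
  · exact fun h => h.2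
  · exact fun h => ⟨by omega, h⟩

-- the inner loop: A's slice comparisons over all j < n equal B's table tests over j ≤ n-k
theorem inner_eq (l : List Char) (k : Nat) (hk1 : 1 ≤ k) (hkn : k ≤ l.length) (c : Int) :
    List.foldl (fun c j =>
      if (List.take k l = PySem.List.slice l (some j) (some (j + (k : Int))) ∨
          List.drop (l.length - k) l = PySem.List.slice l (some j) (some (j + (k : Int))))
      then c + 1 else c) c (PySem.List.pyRange 0 (l.length : Int) 1)
  = List.foldl (fun c j =>
      if ((k : Int) ≤ PySem.List.pyGetD
            ((PySem.List.pyRange 0 ((l.length : Int) + 1) 1).map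
              (fun j => pvLcp l (PySem.List.slice l (some j) none))) j 0 ∨
          (k : Int) ≤ PySem.List.pyGetD
            ((PySem.List.pyRange 0 ((l.length : Int) + 1) 1).map
              (fun j => pvLcp l.reverse (PySem.List.slice l.reverse (some j) none)))
            ((l.length : Int) - j - (k : Int)) 0)
      then c + 1 else c) c (PySem.List.pyRange 0 ((l.length : Int) - (k : Int) + 1) 1) := by
  rw [PySem.List.foldl_ite_add_one, PySem.List.foldl_ite_add_one]
  have hc2 : ((l.length : Int) - (k : Int) + 1) = ((l.length - k + 1 : Nat) : Int) := by
    push_cast; omega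
  rw [hc2, PySem.List.pyRange_zero_nat, PySem.List.pyRange_zero_nat, List.countP_map,
    List.countP_map]
  have hr : List.range l.length
      = List.range (l.length - k + 1) ++ List.map (fun x => l.length - k + 1 + x) (List.range (k - 1)) := by
    rw [← List.range_add]; congr 1; omega
  rw [hr, List.countP_append]
  have hzero : List.countP
      ((fun j => decide (List.take k l = PySem.List.slice l (some j) (some (j + (k : Int))) ∨
          List.drop (l.length - k) l = PySem.List.slice l (some j) (some (j + (k : Int))))) ∘
        (fun t : Nat => (t : Int)))
      (List.map (fun x => l.length - k + 1 + x) (List.range (k - 1))) = 0 := by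
    rw [List.countP_eq_zero]
    intro a ha
    simp only [List.mem_map, List.mem_range] at ha
    obtain ⟨x, hx, rfl⟩ := ha
    simp only [Function.comp_apply, decide_eq_true_eq]
    rw [PySem.List.slice_natCast_add]
    rintro (h | h)
    · have := (prefix_occ_iff l _ k hk1 hkn).1 h
      omega
    · have := (suffix_occ_iff l _ k hk1 hkn).1 h
      omega
  rw [hzero, Nat.add_zero]
  congr 1
  congr 1
  apply List.countP_congr
  intro t ht
  simp only [List.mem_range] at ht
  simp only [Function.comp_apply, decide_eq_true_eq]
  rw [PySem.List.slice_natCast_add]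
  have hidx : (l.length : Int) - (t : Int) - (k : Int) = ((l.length - t - k : Nat) : Int) := by
    omega
  rw [hidx, zTab_get l t (by omega)]
  rw [show ((l.length : Int) + 1) = ((l.reverse.length : Int) + 1) from by simp]
  rw [zTab_get l.reverse (l.length - t - k) (by simp; omega)]
  constructor
  · rintro (h | h)
    · exact Or.inl ((prefix_occ_iff l t k hk1 hkn).1 h).2
    · exact Or.inr ((suffix_occ_iff l t k hk1 hkn).1 h).2
  · rintro (h | h)
    · exact Or.inl ((prefix_occ_iff l t k hk1 hkn).2 ⟨by omega, h⟩)
    · exact Or.inr ((suffix_occ_iff l t k hk1 hkn).2 ⟨by omega, h⟩)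

-- ===== VERDICT (by name: the statement is the Claim_ definition above) =====
theorem find_prefix_and_suffix_spec : Claim_equal_find_prefix_and_suffix := by
  intro s _
  show find_prefix_and_suffix s = find_prefix_and_suffix_alt s
  simp only [find_prefix_and_suffix, find_prefix_and_suffix_alt, PySem.List.len_eq]
  rw [PySem.List.pyRange_one 1]
  have hlen1 : (((s.toList.length : Int) + 1) - 1).toNat = s.toList.length := by omega
  rw [hlen1, List.foldl_map, List.foldl_map]
  apply PySem.List.foldl_congr_mem
  intro acc t ht
  simp only [List.mem_range] at ht
  have hcast : (1 : Int) + (t : Int) = ((t + 1 : Nat) : Int) := by push_cast; ring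
  rw [hcast]
  set l := s.toList with hl
  set k := t + 1 with hk
  have hk1 : 1 ≤ k := by omega
  have hkn : k ≤ l.length := by omega
  rw [PySem.List.slice_to_natCast, PySem.List.slice_from_neg_natCast l k hk1]
  have hlenpfx : ((List.take k l).length : Int) = (k : Int) := by
    simp [List.length_take]; omega
  have hlensfx : ((List.drop (l.length - k) l).length : Int) = (k : Int) := by
    simp [List.length_drop]; omega
  simp only [hlenpfx, hlensfx]
  by_cases hg : List.take k l = List.drop (l.length - k) l
  · have hq : (k : Int) ≤ PySem.List.pyGetD
        ((PySem.List.pyRange 0 ((l.length : Int) + 1) 1).map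
          (fun j => pvLcp l (PySem.List.slice l (some j) none))) ((l.length : Int) - (k : Int)) 0 := by
      have hidx : (l.length : Int) - (k : Int) = ((l.length - k : Nat) : Int) := by omega
      rw [hidx, zTab_get l (l.length - k) (by omega)]
      exact (guard_iff l k hk1 hkn).1 hg
    simp [hg, hq]
  · have hq : ¬ ((k : Int) ≤ PySem.List.pyGetD
        ((PySem.List.pyRange 0 ((l.length : Int) + 1) 1).map
          (fun j => pvLcp l (PySem.List.slice l (some j) none))) ((l.length : Int) - (k : Int)) 0) := by
      have hidx : (l.length : Int) - (k : Int) = ((l.length - k : Nat) : Int) := by omega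
      rw [hidx, zTab_get l (l.length - k) (by omega)]
      exact fun h => hg ((guard_iff l k hk1 hkn).2 h)
    rw [if_pos hg, if_neg hq]
    exact inner_eq l k hk1 hkn acc
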